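-- pv_equiv track=rewrite | github.com/blakegallagher1/gpc-cres | legacy/python/gpc_agents/tax_strategist.py | _find_section_range
-- ===== SOURCE A (Python) =====
-- from typing import Any, Dict, List, Optional
--
-- def _heading_level(line: str) -> int:
--     if not line.startswith("#"):
--         return 0
--     return len(line) - len(line.lstrip("#"))
--
-- def _find_section_range(lines: List[str], section: str) -> Optional[Dict[str, int]]:
--     section_lower = section.lower()
--     start = None
--     level = 0
--     for idx, line in enumerate(lines):
--         if line.startswith("#") and section_lower in line.lower():
--             start = idx
--             level = _heading_level(line)
--             break
--
--     if start is None: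
--         return None
--
--     end = len(lines)
--     for idx in range(start + 1, len(lines)):
--         line = lines[idx]
--         if line.startswith("#") and _heading_level(line) <= level:
--             end = idx
--             break
--
--     return {"start": start, "end": end}
-- ===== SOURCE B (Python) =====
-- from typing import Dict, List, Optional
--
--
-- def _heading_level(line: str) -> int:
--     if not line.startswith("#"):
--         return 0
--     return len(line) - len(line.lstrip("#"))
--
--
-- def _find_section_range(lines: List[str], section: str) -> Optional[Dict[str, int]]:
--     # Build an index of all headings once: (line index, level, lowercased text).
--     headings = [(i, _heading_level(l), l.lower()) for i, l in enumerate(lines) if l.startswith("#")]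
--     sl = section.lower()
--     for j, (i, lvl, low) in enumerate(headings):
--         if sl in low:
--             end = next((k for k, klvl, _ in headings[j + 1:] if klvl <= lvl), len(lines))
--             return {"start": i, "end": end}
--     return None
-- ===== Notes on version B (the rewrite author's own statement) =====
-- stated objective: alternative
-- what changed: B first builds a heading index (index, level, lowercased text) of all '#'-lines in one comprehension, then both the section-match search and the end-boundary search run over that index only, never revisiting non-heading lines.
import Mathlib
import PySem

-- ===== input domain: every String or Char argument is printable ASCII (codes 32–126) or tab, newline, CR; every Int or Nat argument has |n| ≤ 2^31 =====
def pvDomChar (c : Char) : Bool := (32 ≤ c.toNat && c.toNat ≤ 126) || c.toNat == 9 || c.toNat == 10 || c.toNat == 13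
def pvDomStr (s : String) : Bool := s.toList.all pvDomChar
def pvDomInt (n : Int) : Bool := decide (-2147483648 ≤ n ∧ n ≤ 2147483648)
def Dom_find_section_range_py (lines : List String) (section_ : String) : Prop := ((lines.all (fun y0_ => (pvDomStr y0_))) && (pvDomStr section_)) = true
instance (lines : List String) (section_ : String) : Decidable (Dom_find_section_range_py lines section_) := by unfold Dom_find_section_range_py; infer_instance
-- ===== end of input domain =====

-- B builds a heading index (index, level, lowercased text) once and runs both searches over that index (alternative decomposition, same cost).


-- ===== PORT A =====
-- _heading_level; line.lstrip("#") is ported by hand as dropWhile (· == '#') on the char list (exact: it removes exactly the leading '#' characters)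
def heading_level (line : String) : Int :=
  if ¬ (PySem.Str.startswith line "#") then 0
  else (line.toList.length : Int) - ((line.toList.dropWhile (fun c => c == '#')).length : Int)

-- first loop of A: scan enumerate(lines) for the first matching heading, returning (start, level)
def findStartA (sl : String) : List (Int × String) → Option (Int × Int)
  | [] => none
  | (idx, line) :: rest =>
    if PySem.Str.startswith line "#" && PySem.Str.isIn sl (PySem.Str.lower line) then
      some (idx, heading_level line)
    else findStartA sl rest

-- second loop of A: for idx in range(start+1, len(lines)), break at the first boundary heading, else end = len(lines)
def findEndA (lines : List String) (level : Int) : List Int → Int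
  | [] => (lines.length : Int)
  | idx :: rest =>
    let line := PySem.List.pyGetD lines idx ""
    if PySem.Str.startswith line "#" && decide (heading_level line ≤ level) then idx
    else findEndA lines level rest

def find_section_range_py (lines : List String) (section_ : String) : Option (List (String × Int)) :=
  let sl := PySem.Str.lower section_
  match findStartA sl (PySem.List.enumerate lines 0) with
  | none => none
  | some (start, level) =>
      let e := findEndA lines level (PySem.List.pyRange (start + 1) (lines.length : Int) 1)
      some [("start", start), ("end", e)]

-- ===== PORT B =====
-- B's heading index: [(i, _heading_level(l), l.lower()) for i, l in enumerate(lines) if l.startswith("#")]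
def headingIndex (lines : List String) : List (Int × Int × String) :=
  (PySem.List.enumerate lines 0).filterMap (fun p =>
    if PySem.Str.startswith p.2 "#" then some (p.1, heading_level p.2, PySem.Str.lower p.2) else none)

-- next((k for k, klvl, _ in hs if klvl <= lvl), n)
def findEndB (lvl n : Int) : List (Int × Int × String) → Int
  | [] => n
  | (k, klvl, _) :: rest => if decide (klvl ≤ lvl) then k else findEndB lvl n rest

-- the loop over the heading index: first entry whose lowered text contains sl
def searchB (sl : String) (n : Int) : List (Int × Int × String) → Option (Int × Int)
  | [] => none
  | (i, lvl, low) :: rest =>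
    if PySem.Str.isIn sl low then some (i, findEndB lvl n rest)
    else searchB sl n rest

def find_section_range_py_alt (lines : List String) (section_ : String) : Option (List (String × Int)) :=
  let sl := PySem.Str.lower section_
  match searchB sl (lines.length : Int) (headingIndex lines) with
  | none => none
  | some (s, e) => some [("start", s), ("end", e)]

-- ===== PRECONDITION & SPEC =====
def Spec_find_section_range_py (lines : List String) (section_ : String) (out : Option (List (String × Int))) : Prop := out = find_section_range_py_alt lines section_
instance (lines : List String) (section_ : String) (out : Option (List (String × Int))) : Decidable (Spec_find_section_range_py lines section_ out) := by unfold Spec_find_section_range_py; infer_instance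

-- ===== CLAIM (what is proved, stated in full; the proofs are below) =====
def Claim_equal_find_section_range_py : Prop := ∀ (lines : List String) (section_ : String), Dom_find_section_range_py lines section_ → Spec_find_section_range_py lines section_ (find_section_range_py lines section_)

-- ===== LEMMAS AND PROOFS =====

-- the heading index of the suffix starting at position k
def hIdxFrom (lines : List String) (k : Nat) : List (Int × Int × String) :=
  (PySem.List.enumerate (lines.drop k) (k : Int)).filterMap (fun p =>
    if PySem.Str.startswith p.2 "#" then some (p.1, heading_level p.2, PySem.Str.lower p.2) else none)

-- A's second loop over range(k, len) equals B's search over the heading index of the suffix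
theorem findEndA_eq_findEndB (lines : List String) (lvl : Int) (k : Nat) :
    findEndA lines lvl (PySem.List.pyRange (k : Int) (lines.length : Int) 1)
      = findEndB lvl (lines.length : Int) (hIdxFrom lines k) := by
  induction h : lines.length - k generalizing k with
  | zero =>
    have hk' : lines.length ≤ k := by omega
    rw [PySem.List.pyRange_one_eq_nil (by exact_mod_cast hk')]
    simp [hIdxFrom, List.drop_eq_nil_of_le hk', findEndA, findEndB]
  | succ m ih =>
    have hlt : k < lines.length := by omega
    rw [PySem.List.pyRange_one_cons (by exact_mod_cast hlt)]
    unfold hIdxFrom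
    rw [List.drop_eq_getElem_cons hlt, PySem.List.enumerate_cons]
    simp only [findEndA, List.filterMap_cons]
    have hget : PySem.List.pyGetD lines (k : Int) "" = lines[k] := by
      simp [PySem.List.pyGetD, PySem.List.pyGet?_natCast, List.getElem?_eq_getElem hlt]
    rw [hget]
    have hcast : ((k : Int) + 1) = ((k + 1 : Nat) : Int) := by push_cast; ring
    by_cases hs : PySem.Str.startswith lines[k] "#"
    · simp only [hs, if_pos, Bool.true_and, findEndB]
      by_cases hl : heading_level lines[k] ≤ lvl
      · simp [hl]
      · simp only [hl, decide_false, if_false, Bool.false_eq_true]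
        rw [hcast, ih (k + 1) (by omega)]
        rfl
    · simp only [hs, Bool.false_and, if_false, Bool.false_eq_true]
      rw [hcast, ih (k + 1) (by omega)]
      rfl

-- main invariant: from position k, A's two-phase result equals B's search over the suffix heading index
theorem main_invariant (sl : String) (lines : List String) (k : Nat) :
    (match findStartA sl (PySem.List.enumerate (lines.drop k) (k : Int)) with
      | none => (none : Option (List (String × Int)))
      | some (start, level) =>
          some [("start", start),
                ("end", findEndA lines level (PySem.List.pyRange (start + 1) (lines.length : Int) 1))]) =
    (match searchB sl (lines.length : Int) (hIdxFrom lines k) with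
      | none => (none : Option (List (String × Int)))
      | some (s, e) => some [("start", s), ("end", e)]) := by
  induction h : lines.length - k generalizing k with
  | zero =>
    have hk' : lines.length ≤ k := by omega
    simp [hIdxFrom, List.drop_eq_nil_of_le hk', findStartA, searchB]
  | succ m ih =>
    have hlt : k < lines.length := by omega
    unfold hIdxFrom
    rw [List.drop_eq_getElem_cons hlt, PySem.List.enumerate_cons]
    simp only [findStartA, List.filterMap_cons]
    have hcast : ((k : Int) + 1) = ((k + 1 : Nat) : Int) := by push_cast; ring
    by_cases hs : PySem.Str.startswith lines[k] "#"
    · simp only [hs, Bool.true_and, if_pos, searchB]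
      by_cases hin : PySem.Str.isIn sl (PySem.Str.lower lines[k])
      · simp only [hin, if_pos]
        rw [hcast, findEndA_eq_findEndB lines (heading_level lines[k]) (k + 1)]
        rfl
      · simp only [hin, if_false, Bool.false_eq_true]
        rw [hcast]
        have := ih (k + 1) (by omega)
        unfold hIdxFrom at this
        exact this
    · simp only [hs, Bool.false_and, if_false, Bool.false_eq_true]
      rw [hcast]
      have := ih (k + 1) (by omega)
      unfold hIdxFrom at this
      exact this

-- ===== VERDICT (by name: the statement is the Claim_ definition above) =====
theorem find_section_range_py_spec : Claim_equal_find_section_range_py := by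
  intro lines section_ _
  unfold Spec_find_section_range_py find_section_range_py find_section_range_py_alt
  have h := main_invariant (PySem.Str.lower section_) lines 0
  simp only [List.drop_zero, Nat.cast_zero] at h
  unfold hIdxFrom at h
  simp only [List.drop_zero, Nat.cast_zero] at h
  exact h
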